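-- pv_equiv track=rewrite | github.com/Naturalenemy07/Principles_of_Computing_Rice | HW4.py | make_enum
-- ===== SOURCE A (Python) =====
-- def make_enum(outcomes, length):
--     """
--     Iterative function that enumerates the set of all sequences of
--     outcomes of given length
--     """
--     # I still dont understand this function
--     ans = set([()])
--     for dummy_idx in range(length):
--         temp = set()
--         for seq in ans:
--             for item in outcomes:
--                 new_seq = list(seq)
--                 new_seq.append(item)
--                 temp.add(tuple(new_seq))
--         ans = temp
--     return ans
-- ===== SOURCE B (Python) =====
-- def make_enum(outcomes, length):
--     """
--     Recursive function that enumerates the set of all sequences of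
--     outcomes of given length
--     """
--     if length <= 0:
--         return {()}
--     rec = make_enum(outcomes, length - 1)
--     return {rest + (item,) for rest in rec for item in outcomes}
-- ===== Notes on version B (the rewrite author's own statement) =====
-- stated objective: simpler
-- what changed: Replaces the iterative layer-by-layer loop (range(length) with an explicit temp set rebuilt each pass) by a structural recursion on length: base case {()}, recursive step a single set comprehension extending every shorter sequence by every outcome.
import Mathlib
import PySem

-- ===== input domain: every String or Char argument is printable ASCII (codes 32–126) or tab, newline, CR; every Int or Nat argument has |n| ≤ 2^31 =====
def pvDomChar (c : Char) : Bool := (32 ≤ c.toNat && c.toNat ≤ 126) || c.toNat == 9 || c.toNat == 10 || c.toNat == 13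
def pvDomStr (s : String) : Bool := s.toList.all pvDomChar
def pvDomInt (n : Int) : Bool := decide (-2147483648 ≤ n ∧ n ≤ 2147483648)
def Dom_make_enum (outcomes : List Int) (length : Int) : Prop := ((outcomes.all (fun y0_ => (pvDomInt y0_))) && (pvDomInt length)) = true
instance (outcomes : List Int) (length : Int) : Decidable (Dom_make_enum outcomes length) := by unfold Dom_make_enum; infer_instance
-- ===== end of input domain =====

-- B replaces A's iterative layer-by-layer loop by a structural recursion on length (same cost, simpler decomposition).
-- ===== PORT A =====
def make_enum (outcomes : List Int) (length : Int) : List (List Int) :=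
  (PySem.List.pyRange 0 length 1).foldl
    (fun ans _ =>
      ans.foldl
        (fun temp seq =>
          outcomes.foldl (fun temp item => PySem.Set.add temp (seq ++ [item])) temp)
        PySem.Set.empty)
    (PySem.Set.ofList [([] : List Int)])

-- ===== PORT B =====
-- helper: the recursion of Source B on the (nonnegative) length
def make_enum_alt_rec (outcomes : List Int) : Nat → List (List Int)
  | 0 => PySem.Set.ofList [([] : List Int)]
  | n+1 => PySem.Set.ofList
      ((make_enum_alt_rec outcomes n).flatMap
        (fun rest => outcomes.map (fun item => rest ++ [item])))

def make_enum_alt (outcomes : List Int) (length : Int) : List (List Int) :=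
  if length ≤ 0 then PySem.Set.ofList [([] : List Int)]
  else make_enum_alt_rec outcomes length.toNat

-- ===== PRECONDITION & SPEC =====
def Spec_make_enum (outcomes : List Int) (length : Int) (out : List (List Int)) : Prop := out = make_enum_alt outcomes length
instance (outcomes : List Int) (length : Int) (out : List (List Int)) : Decidable (Spec_make_enum outcomes length out) := by unfold Spec_make_enum; infer_instance

-- ===== CLAIM (what is proved, stated in full; the proofs are below) =====
def Claim_equal_make_enum : Prop := ∀ (outcomes : List Int) (length : Int), Dom_make_enum outcomes length → Spec_make_enum outcomes length (make_enum outcomes length)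

-- ===== LEMMAS AND PROOFS =====
-- A's one layer step (nested folds with Set.add) equals B's ofList of a flatMap
theorem pv_step_eq (outcomes : List Int) (s : List (List Int)) (init : List (List Int)) :
    s.foldl
      (fun temp seq =>
        outcomes.foldl (fun temp item => PySem.Set.add temp (seq ++ [item])) temp)
      init
    = (s.flatMap (fun rest => outcomes.map (fun item => rest ++ [item]))).foldl
        PySem.Set.add init := by
  induction s generalizing init with
  | nil => simp
  | cons a s ih =>
    simp only [List.flatMap_cons, List.foldl_append, List.foldl_cons, List.foldl_map]
    exact ih _

theorem pv_main (outcomes : List Int) (n : Nat) :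
    make_enum outcomes (n : Int) = make_enum_alt_rec outcomes n := by
  induction n with
  | zero =>
    simp [make_enum, make_enum_alt_rec, PySem.List.pyRange_one_eq_nil]
  | succ n ih =>
    unfold make_enum at ih ⊢
    have hc : ((n + 1 : Nat) : Int) = (n : Int) + 1 := by push_cast; ring
    rw [hc, PySem.List.pyRange_one_succ_right (by positivity), List.foldl_append,
      List.foldl_cons, List.foldl_nil, ih, make_enum_alt_rec, PySem.Set.ofList_eq_foldl]
    exact pv_step_eq outcomes _ _

-- ===== VERDICT (by name: the statement is the Claim_ definition above) =====
theorem make_enum_spec : Claim_equal_make_enum := by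
  intro outcomes length _
  unfold Spec_make_enum make_enum_alt
  by_cases h : length ≤ 0
  · simp [make_enum, PySem.List.pyRange_one_eq_nil h, h]
  · have h0 : (0:Int) ≤ length := by omega
    rw [if_neg h, ← pv_main outcomes length.toNat, Int.toNat_of_nonneg h0]
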